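-- pv_equiv track=rewrite | github.com/federicobrancasi/app | backend/api/routes/chat.py | _generate_contextual_suggestions
-- ===== SOURCE A (Python) =====
-- from typing import Any, Dict, List, Optional
--
-- def _generate_contextual_suggestions(
--     message: str, response_data: Dict[str, Any]
-- ) -> List[str]:
--     """Generate contextual suggestions based on the conversation"""
--     message_lower = message.lower()
--     action = response_data.get("action")
--
--     # Suggestions based on actions taken
--     if action == "setup_monitoring":
--         return [
--             "What events are you currently monitoring?",
--             "Show me recent activity",
--             "How do I stop a monitoring task?",
--             "Set up another monitoring alert",
--         ]
--     elif action == "events_summary":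
--         return [
--             "Show me more details about recent events",
--             "Monitor for unusual activity",
--             "What's happening right now?",
--             "Generate a security report",
--         ]
--     elif action == "frame_analysis":
--         return [
--             "What happened in the last hour?",
--             "Monitor this camera for deliveries",
--             "Are there any security concerns?",
--             "Optimize this camera's settings",
--         ]
--
--     # Suggestions based on message content
--     if any(word in message_lower for word in ["delivery", "package"]):
--         return [
--             "Monitor for vehicle arrivals",
--             "What delivery events happened this week?",
--             "Set up alerts for front door activity",
--             "Show me today's visitor activity",
--         ]
--     elif any(word in message_lower for word in ["happened", "events", "activity"]):
--         return [
--             "Monitor for future events",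
--             "Show me live camera feeds",
--             "Set up custom alerts",
--             "Generate a detailed report",
--         ]
--     elif any(word in message_lower for word in ["monitor", "watch", "alert"]):
--         return [
--             "What are you currently monitoring?",
--             "Show me recent detections",
--             "How sensitive are the alerts?",
--             "Monitor additional cameras",
--         ]
--
--     # Default suggestions
--     return [
--         "What happened today?",
--         "Monitor for package deliveries",
--         "Show me live camera feeds",
--         "Are all cameras working properly?",
--         "Set up a custom alert",
--         "Generate a security summary",
--     ]
-- ===== SOURCE B (Python) =====
-- from typing import Any, Dict, List, Optional
--
-- # Seven suggestion lists, ranked by priority (0..5 = rules, 6 = default).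
-- _SUGGESTIONS = [
--     [
--         "What events are you currently monitoring?",
--         "Show me recent activity",
--         "How do I stop a monitoring task?",
--         "Set up another monitoring alert",
--     ],
--     [
--         "Show me more details about recent events",
--         "Monitor for unusual activity",
--         "What's happening right now?",
--         "Generate a security report",
--     ],
--     [
--         "What happened in the last hour?",
--         "Monitor this camera for deliveries",
--         "Are there any security concerns?",
--         "Optimize this camera's settings",
--     ],
--     [
--         "Monitor for vehicle arrivals",
--         "What delivery events happened this week?",
--         "Set up alerts for front door activity",
--         "Show me today's visitor activity",
--     ],
--     [
--         "Monitor for future events",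
--         "Show me live camera feeds",
--         "Set up custom alerts",
--         "Generate a detailed report",
--     ],
--     [
--         "What are you currently monitoring?",
--         "Show me recent detections",
--         "How sensitive are the alerts?",
--         "Monitor additional cameras",
--     ],
--     [
--         "What happened today?",
--         "Monitor for package deliveries",
--         "Show me live camera feeds",
--         "Are all cameras working properly?",
--         "Set up a custom alert",
--         "Generate a security summary",
--     ],
-- ]
--
-- _ACTION_RANK = {"setup_monitoring": 0, "events_summary": 1, "frame_analysis": 2}
--
-- # Flat keyword -> rank map (no keyword groups; priority is encoded in the rank).
-- _KEYWORD_RANK = {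
--     "delivery": 3, "package": 3,
--     "happened": 4, "events": 4, "activity": 4,
--     "monitor": 5, "watch": 5, "alert": 5,
-- }
--
--
-- def _generate_contextual_suggestions(
--     message: str, response_data: Dict[str, Any]
-- ) -> List[str]:
--     """Rank every matching rule and return the best-ranked suggestion list."""
--     message_lower = message.lower()
--     best = min(
--         [_ACTION_RANK.get(response_data.get("action"), 6)]
--         + [r for kw, r in _KEYWORD_RANK.items() if kw in message_lower]
--     )
--     return _SUGGESTIONS[best]
-- ===== Notes on version B (the rewrite author's own statement) =====
-- stated objective: alternative
-- what changed: Instead of an ordered if/elif chain with grouped any() scans, B ranks every rule: a flat keyword->rank map (no keyword groups) and an action->rank map produce the set of ranks of ALL matching rules, and the answer is the suggestion list indexed by the minimum rank; priority is encoded arithmetically in the ranks rather than by control flow.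
import Mathlib
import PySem

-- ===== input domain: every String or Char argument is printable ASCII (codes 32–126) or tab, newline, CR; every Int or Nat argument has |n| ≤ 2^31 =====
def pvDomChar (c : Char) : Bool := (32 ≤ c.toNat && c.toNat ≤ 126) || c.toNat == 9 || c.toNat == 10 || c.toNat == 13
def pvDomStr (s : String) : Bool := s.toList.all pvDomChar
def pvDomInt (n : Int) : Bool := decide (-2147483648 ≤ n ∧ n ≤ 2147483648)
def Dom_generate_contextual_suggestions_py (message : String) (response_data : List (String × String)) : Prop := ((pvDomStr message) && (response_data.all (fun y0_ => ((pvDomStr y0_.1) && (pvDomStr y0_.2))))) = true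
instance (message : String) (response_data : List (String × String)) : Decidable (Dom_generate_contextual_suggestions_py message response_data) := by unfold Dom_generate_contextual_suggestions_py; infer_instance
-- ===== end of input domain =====

-- B replaces A's ordered if/elif control flow by rank minimisation over a flat keyword->rank map (objective: alternative).

-- ===== PORT A =====
def generate_contextual_suggestions_py (message : String) (response_data : List (String × String)) : List String :=
  let message_lower := PySem.Str.lower message
  let action := (response_data.find? (fun p => p.1 == "action")).map (·.2)
  if action == some "setup_monitoring" then
    ["What events are you currently monitoring?",
     "Show me recent activity",
     "How do I stop a monitoring task?",
     "Set up another monitoring alert"]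
  else if action == some "events_summary" then
    ["Show me more details about recent events",
     "Monitor for unusual activity",
     "What's happening right now?",
     "Generate a security report"]
  else if action == some "frame_analysis" then
    ["What happened in the last hour?",
     "Monitor this camera for deliveries",
     "Are there any security concerns?",
     "Optimize this camera's settings"]
  else if ["delivery", "package"].any (fun w => PySem.Str.isIn w message_lower) then
    ["Monitor for vehicle arrivals",
     "What delivery events happened this week?",
     "Set up alerts for front door activity",
     "Show me today's visitor activity"]
  else if ["happened", "events", "activity"].any (fun w => PySem.Str.isIn w message_lower) then
    ["Monitor for future events",
     "Show me live camera feeds",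
     "Set up custom alerts",
     "Generate a detailed report"]
  else if ["monitor", "watch", "alert"].any (fun w => PySem.Str.isIn w message_lower) then
    ["What are you currently monitoring?",
     "Show me recent detections",
     "How sensitive are the alerts?",
     "Monitor additional cameras"]
  else
    ["What happened today?",
     "Monitor for package deliveries",
     "Show me live camera feeds",
     "Are all cameras working properly?",
     "Set up a custom alert",
     "Generate a security summary"]

-- ===== PORT B =====
def pvSuggestions : List (List String) :=
  [["What events are you currently monitoring?",
    "Show me recent activity",
    "How do I stop a monitoring task?",
    "Set up another monitoring alert"],
   ["Show me more details about recent events",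
    "Monitor for unusual activity",
    "What's happening right now?",
    "Generate a security report"],
   ["What happened in the last hour?",
    "Monitor this camera for deliveries",
    "Are there any security concerns?",
    "Optimize this camera's settings"],
   ["Monitor for vehicle arrivals",
    "What delivery events happened this week?",
    "Set up alerts for front door activity",
    "Show me today's visitor activity"],
   ["Monitor for future events",
    "Show me live camera feeds",
    "Set up custom alerts",
    "Generate a detailed report"],
   ["What are you currently monitoring?",
    "Show me recent detections",
    "How sensitive are the alerts?",
    "Monitor additional cameras"],
   ["What happened today?",
    "Monitor for package deliveries",
    "Show me live camera feeds",
    "Are all cameras working properly?",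
    "Set up a custom alert",
    "Generate a security summary"]]

def pvActionRank : List (String × Int) :=
  [("setup_monitoring", 0), ("events_summary", 1), ("frame_analysis", 2)]

def pvKeywordRank : List (String × Int) :=
  [("delivery", 3), ("package", 3),
   ("happened", 4), ("events", 4), ("activity", 4),
   ("monitor", 5), ("watch", 5), ("alert", 5)]

def generate_contextual_suggestions_py_alt (message : String) (response_data : List (String × String)) : List String :=
  let message_lower := PySem.Str.lower message
  -- _ACTION_RANK.get(response_data.get("action"), 6)  (get(None, 6) = 6)
  let actionRank : Int :=
    match (response_data.find? (fun p => p.1 == "action")).map (·.2) with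
    | some a => ((pvActionRank.find? (fun p => p.1 == a)).map (·.2)).getD 6
    | none => 6
  -- [r for kw, r in _KEYWORD_RANK.items() if kw in message_lower]
  let hits := pvKeywordRank.filterMap
    (fun p => if PySem.Str.isIn p.1 message_lower then some p.2 else none)
  -- min([actionRank] + hits)
  let best := hits.foldl (fun m r => if r < m then r else m) actionRank
  -- _SUGGESTIONS[best]  (best is always in range 0..6)
  (PySem.List.pyGet? pvSuggestions best).getD []

-- ===== PRECONDITION & SPEC =====
def Spec_generate_contextual_suggestions_py (message : String) (response_data : List (String × String)) (out : List String) : Prop := out = generate_contextual_suggestions_py_alt message response_data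
instance (message : String) (response_data : List (String × String)) (out : List String) : Decidable (Spec_generate_contextual_suggestions_py message response_data out) := by unfold Spec_generate_contextual_suggestions_py; infer_instance

-- ===== CLAIM =====
def Claim_equal_generate_contextual_suggestions_py : Prop := ∀ (message : String) (response_data : List (String × String)), Dom_generate_contextual_suggestions_py message response_data → Spec_generate_contextual_suggestions_py message response_data (generate_contextual_suggestions_py message response_data)

-- ===== LEMMAS AND PROOFS =====

-- every matched keyword rank is ≥ 3
lemma pv_hits_ge (message_lower : String) :
    ∀ r ∈ pvKeywordRank.filterMap
      (fun p => if PySem.Str.isIn p.1 message_lower then some p.2 else none), 3 ≤ r := by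
  intro r hr
  rw [List.mem_filterMap] at hr
  obtain ⟨p, hp, hf⟩ := hr
  split at hf
  · cases hf
    simp [pvKeywordRank] at hp
    rcases hp with h|h|h|h|h|h|h|h <;> simp [h]
  · exact absurd hf (by simp)

-- folding min over ranks that are never below k leaves k unchanged
lemma pv_fold_const (k : Int) (l : List Int) (h : ∀ r ∈ l, ¬ r < k) :
    l.foldl (fun m r => if r < m then r else m) k = k := by
  induction l with
  | nil => rfl
  | cons r t ih =>
    simp only [List.foldl_cons, if_neg (h r (List.mem_cons_self ..))]
    exact ih (fun x hx => h x (List.mem_cons_of_mem _ hx))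

-- the keyword/default part: A's if-chain equals B's min-rank indexing when no action rule fires
lemma pv_kw_case (message : String) :
    (if ["delivery", "package"].any (fun w => PySem.Str.isIn w (PySem.Str.lower message)) then
      ["Monitor for vehicle arrivals",
       "What delivery events happened this week?",
       "Set up alerts for front door activity",
       "Show me today's visitor activity"]
     else if ["happened", "events", "activity"].any (fun w => PySem.Str.isIn w (PySem.Str.lower message)) then
      ["Monitor for future events",
       "Show me live camera feeds",
       "Set up custom alerts",
       "Generate a detailed report"]
     else if ["monitor", "watch", "alert"].any (fun w => PySem.Str.isIn w (PySem.Str.lower message)) then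
      ["What are you currently monitoring?",
       "Show me recent detections",
       "How sensitive are the alerts?",
       "Monitor additional cameras"]
     else
      ["What happened today?",
       "Monitor for package deliveries",
       "Show me live camera feeds",
       "Are all cameras working properly?",
       "Set up a custom alert",
       "Generate a security summary"]) =
    (PySem.List.pyGet? pvSuggestions
      ((pvKeywordRank.filterMap
        (fun p => if PySem.Str.isIn p.1 (PySem.Str.lower message) then some p.2 else none)).foldl
        (fun m r => if r < m then r else m) 6)).getD [] := by
  simp only [List.any_cons, List.any_nil, Bool.or_false, pvKeywordRank, List.filterMap]
  generalize PySem.Str.isIn "delivery" (PySem.Str.lower message) = b1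
  generalize PySem.Str.isIn "package" (PySem.Str.lower message) = b2
  generalize PySem.Str.isIn "happened" (PySem.Str.lower message) = b3
  generalize PySem.Str.isIn "events" (PySem.Str.lower message) = b4
  generalize PySem.Str.isIn "activity" (PySem.Str.lower message) = b5
  generalize PySem.Str.isIn "monitor" (PySem.Str.lower message) = b6
  generalize PySem.Str.isIn "watch" (PySem.Str.lower message) = b7
  generalize PySem.Str.isIn "alert" (PySem.Str.lower message) = b8
  cases b1 <;> cases b2 <;> cases b3 <;> cases b4 <;> cases b5 <;> cases b6 <;> cases b7 <;> cases b8 <;> rfl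

-- ===== VERDICT =====
theorem generate_contextual_suggestions_py_spec : Claim_equal_generate_contextual_suggestions_py := by
  intro message response_data _
  unfold Spec_generate_contextual_suggestions_py
  unfold generate_contextual_suggestions_py generate_contextual_suggestions_py_alt
  cases h : (response_data.find? (fun p => p.1 == "action")).map (·.2) with
  | none =>
    simpa using pv_kw_case message
  | some a =>
    have hge := pv_hits_ge (PySem.Str.lower message)
    by_cases h1 : a = "setup_monitoring"
    · subst h1
      simp only [pvActionRank, List.find?, Option.map, Option.getD,
        show (("setup_monitoring" == "setup_monitoring") : Bool) = true from by decide,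
        show ((some "setup_monitoring" == some ("setup_monitoring" : String)) : Bool) = true from by decide,
        if_true]
      rw [pv_fold_const 0 _ (fun r hr => by have := hge r hr; omega)]
      rfl
    · by_cases h2 : a = "events_summary"
      · subst h2
        simp only [pvActionRank, List.find?, Option.map, Option.getD,
          show (("setup_monitoring" == "events_summary") : Bool) = false from by decide,
          show (("events_summary" == "events_summary") : Bool) = true from by decide,
          show ((some "events_summary" == some ("setup_monitoring" : String)) : Bool) = false from by decide,
          show ((some "events_summary" == some ("events_summary" : String)) : Bool) = true from by decide,
          Bool.false_eq_true, if_false, if_true]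
        rw [pv_fold_const 1 _ (fun r hr => by have := hge r hr; omega)]
        rfl
      · by_cases h3 : a = "frame_analysis"
        · subst h3
          simp only [pvActionRank, List.find?, Option.map, Option.getD,
            show (("setup_monitoring" == "frame_analysis") : Bool) = false from by decide,
            show (("events_summary" == "frame_analysis") : Bool) = false from by decide,
            show (("frame_analysis" == "frame_analysis") : Bool) = true from by decide,
            show ((some "frame_analysis" == some ("setup_monitoring" : String)) : Bool) = false from by decide,
            show ((some "frame_analysis" == some ("events_summary" : String)) : Bool) = false from by decide,
            show ((some "frame_analysis" == some ("frame_analysis" : String)) : Bool) = true from by decide,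
            Bool.false_eq_true, if_false, if_true]
          rw [pv_fold_const 2 _ (fun r hr => by have := hge r hr; omega)]
          rfl
        · simp only [pvActionRank, List.find?, Option.map,
            show (("setup_monitoring" == a) : Bool) = false from by simp [Ne.symm h1],
            show (("events_summary" == a) : Bool) = false from by simp [Ne.symm h2],
            show (("frame_analysis" == a) : Bool) = false from by simp [Ne.symm h3],
            show ((some a == some "setup_monitoring") : Bool) = false from by simp [h1],
            show ((some a == some "events_summary") : Bool) = false from by simp [h2],
            show ((some a == some "frame_analysis") : Bool) = false from by simp [h3],
            Bool.false_eq_true, if_false, Option.getD]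
          simpa using pv_kw_case message
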